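-- pv_equiv track=rewrite | github.com/drew3k/diploma | app/pipeline/utils.py | _mask_digits_preserve
-- ===== SOURCE A (Python) =====
-- def _mask_digits_preserve(text: str, keep_digits: int = 4) -> str:
--     seen = 0
--     out = []
--     for ch in text:
--         if ch.isdigit():
--             out.append(ch if seen < keep_digits else "*")
--             seen += 1
--         else:
--             out.append(ch)
--     return "".join(out)
-- ===== SOURCE B (Python) =====
-- def _mask_digits_preserve(text: str, keep_digits: int = 4) -> str:
--     # Find the boundary just after the keep_digits-th digit, then bulk-mask the tail.
--     split = 0
--     if keep_digits > 0:
--         remaining = keep_digits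
--         split = len(text)
--         for i, ch in enumerate(text):
--             if ch.isdigit():
--                 remaining -= 1
--                 if remaining == 0:
--                     split = i + 1
--                     break
--     return text[:split] + "".join("*" if c.isdigit() else c for c in text[split:])
-- ===== Notes on version B (the rewrite author's own statement) =====
-- stated objective: alternative
-- what changed: Instead of one counter-driven pass deciding per character, B first locates the split index just after the keep_digits-th digit, then returns the verbatim prefix slice plus the tail with every digit replaced by an asterisk.
import Mathlib
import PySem

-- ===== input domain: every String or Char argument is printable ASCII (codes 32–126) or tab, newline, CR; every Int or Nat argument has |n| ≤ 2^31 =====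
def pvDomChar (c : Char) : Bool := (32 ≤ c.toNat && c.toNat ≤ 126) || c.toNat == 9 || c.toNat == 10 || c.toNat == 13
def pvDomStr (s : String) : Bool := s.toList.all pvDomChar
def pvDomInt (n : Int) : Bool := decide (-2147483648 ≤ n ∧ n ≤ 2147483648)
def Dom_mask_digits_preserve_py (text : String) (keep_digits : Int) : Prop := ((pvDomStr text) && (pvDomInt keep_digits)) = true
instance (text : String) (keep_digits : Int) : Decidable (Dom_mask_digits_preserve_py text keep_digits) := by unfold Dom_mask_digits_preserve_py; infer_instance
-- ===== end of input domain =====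

-- B finds the split index just after the keep_digits-th digit, then bulk-masks the tail's digits;
-- A is a single counter-driven pass.  Objective: alternative decomposition (same cost).

-- ===== PORT A =====
-- literal port of A: one pass with a `seen` counter and an output list that is joined at the end
def mask_digits_preserve_py (text : String) (keep_digits : Int) : String :=
  let st := text.toList.foldl (fun (st : Int × List Char) ch =>
      if PySem.Chars.isdigit ch then
        (st.1 + 1, st.2 ++ [if st.1 < keep_digits then ch else '*'])
      else
        (st.1, st.2 ++ [ch])) (0, [])
  String.ofList st.2

-- ===== PORT B =====
-- Source B's boundary scan: index just after the keep_digits-th digit (0 if keep_digits ≤ 0, end of string if fewer digits)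
def pvSplitIdx : List Char → Int → Nat
  | [], _ => 0
  | c :: rest, k =>
      if k ≤ 0 then 0
      else pvSplitIdx rest (if PySem.Chars.isdigit c then k - 1 else k) + 1

def mask_digits_preserve_py_alt (text : String) (keep_digits : Int) : String :=
  let cs := text.toList
  let n := pvSplitIdx cs keep_digits
  String.ofList (cs.take n ++ (cs.drop n).map (fun c => if PySem.Chars.isdigit c then '*' else c))

-- ===== PRECONDITION & SPEC =====
def Spec_mask_digits_preserve_py (text : String) (keep_digits : Int) (out : String) : Prop := out = mask_digits_preserve_py_alt text keep_digits
instance (text : String) (keep_digits : Int) (out : String) : Decidable (Spec_mask_digits_preserve_py text keep_digits out) := by unfold Spec_mask_digits_preserve_py; infer_instance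

-- ===== CLAIM (what is proved, stated in full; the proofs are below) =====
def Claim_equal_mask_digits_preserve_py : Prop := ∀ (text : String) (keep_digits : Int), Dom_mask_digits_preserve_py text keep_digits → Spec_mask_digits_preserve_py text keep_digits (mask_digits_preserve_py text keep_digits)

-- ===== LEMMAS AND PROOFS =====

-- A's loop body as a simple structural recursion (proof-side model of the foldl)
def pvGo (keep : Int) : List Char → Int → List Char
  | [], _ => []
  | c :: rest, seen =>
      if PySem.Chars.isdigit c then
        (if seen < keep then c else '*') :: pvGo keep rest (seen + 1)
      else
        c :: pvGo keep rest seen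

theorem pvFoldl_eq_go (keep : Int) (cs : List Char) :
    ∀ (seen : Int) (acc : List Char),
      (cs.foldl (fun (st : Int × List Char) ch =>
        if PySem.Chars.isdigit ch then
          (st.1 + 1, st.2 ++ [if st.1 < keep then ch else '*'])
        else
          (st.1, st.2 ++ [ch])) (seen, acc)).2 = acc ++ pvGo keep cs seen := by
  induction cs with
  | nil => intro seen acc; simp [pvGo]
  | cons c rest ih =>
      intro seen acc
      by_cases h : PySem.Chars.isdigit c = true <;>
        simp [pvGo, h, ih, List.append_assoc]

theorem pvSplitIdx_nonpos (cs : List Char) (k : Int) (hk : k ≤ 0) :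
    pvSplitIdx cs k = 0 := by
  cases cs <;> simp [pvSplitIdx, hk]

theorem pvGo_eq_split (keep : Int) (cs : List Char) :
    ∀ (seen : Int),
      pvGo keep cs seen =
        cs.take (pvSplitIdx cs (keep - seen)) ++
          (cs.drop (pvSplitIdx cs (keep - seen))).map
            (fun c => if PySem.Chars.isdigit c then '*' else c) := by
  induction cs with
  | nil => intro seen; simp [pvGo, pvSplitIdx]
  | cons c rest ih =>
      intro seen
      by_cases hk : keep - seen ≤ 0
      · have hseen : ¬ seen < keep := by omega
        by_cases h : PySem.Chars.isdigit c = true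
        · have hk' : keep - (seen + 1) ≤ 0 := by omega
          simp [pvGo, pvSplitIdx, h, hseen, hk, ih (seen + 1),
            pvSplitIdx_nonpos rest _ hk']
        · simp [pvGo, pvSplitIdx, h, hk, ih seen,
            pvSplitIdx_nonpos rest _ hk]
      · have hseen : seen < keep := by omega
        by_cases h : PySem.Chars.isdigit c = true
        · have : keep - seen - 1 = keep - (seen + 1) := by omega
          simp [pvGo, pvSplitIdx, h, hseen, hk, this, ih (seen + 1)]
        · simp [pvGo, pvSplitIdx, h, hk, ih seen]

-- ===== VERDICT (by name: the statement is the Claim_ definition above) =====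
theorem mask_digits_preserve_py_spec : Claim_equal_mask_digits_preserve_py := by
  intro text keep_digits _
  unfold Spec_mask_digits_preserve_py mask_digits_preserve_py mask_digits_preserve_py_alt
  have h1 := pvFoldl_eq_go keep_digits text.toList 0 []
  have h2 := pvGo_eq_split keep_digits text.toList 0
  simp only [Int.sub_zero] at h2
  simp [h1, h2]
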